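-- pv_equiv track=rewrite | github.com/Arsen1302/Code-copy-detector | TestData/solutions/problem_411_5_1.py | solution_411_5_1
-- ===== SOURCE A (Python) =====
-- from typing import List
--
-- def solution_411_5_1(grid: List[List[int]]) -> int:
--     rowLength = len(grid[0])
--     columnLength = len(grid)
--     visited = {}
--
--     def solution_411_5_2(i,j):
--         if(i<0 or i>=columnLength or j<0 or j>=rowLength or grid[i][j] == 0 or (i,j) in visited):
--             return 0
--         visited[(i,j)] = True
--         left = solution_411_5_2(i,j-1)
--         right = solution_411_5_2(i,j+1)
--         top = solution_411_5_2(i-1,j)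
--         bottom = solution_411_5_2(i+1,j)
--         return 1 + left + right + top + bottom
--
--     result = 0
--     for i in range(columnLength):
--         for j in range(rowLength):
--             result = max(result,solution_411_5_2(i,j))
--
--     return result
-- ===== SOURCE B (Python) =====
-- from typing import List
--
-- def solution_411_5_1(grid: List[List[int]]) -> int:
--     rowLength = len(grid[0])
--     columnLength = len(grid)
--     ones = {(i, j) for i in range(columnLength) for j in range(rowLength)
--             if grid[i][j] != 0}
--     best = 0
--     seen = set()
--     for i in range(columnLength):
--         for j in range(rowLength):
--             if (i, j) not in ones or (i, j) in seen:
--                 continue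
--             comp = {(i, j)}
--             while True:
--                 grown = comp | {(a + da, b + db)
--                                 for (a, b) in comp
--                                 for (da, db) in ((0, 1), (0, -1), (1, 0), (-1, 0))
--                                 if (a + da, b + db) in ones}
--                 if grown == comp:
--                     break
--                 comp = grown
--             seen |= comp
--             best = max(best, len(comp))
--     return best
-- ===== Notes on version B (the rewrite author's own statement) =====
-- stated objective: alternative
-- what changed: Replaces A's shared-visited recursive flood fill with an iterative algorithm: B precomputes the set of nonzero cells once, then for each not-yet-seen one-cell computes its whole connected component by repeatedly expanding a candidate set with in-set neighbours until the set reaches a fixpoint (no recursion, no per-cell DFS), and returns the maximum component size.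
import Mathlib
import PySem

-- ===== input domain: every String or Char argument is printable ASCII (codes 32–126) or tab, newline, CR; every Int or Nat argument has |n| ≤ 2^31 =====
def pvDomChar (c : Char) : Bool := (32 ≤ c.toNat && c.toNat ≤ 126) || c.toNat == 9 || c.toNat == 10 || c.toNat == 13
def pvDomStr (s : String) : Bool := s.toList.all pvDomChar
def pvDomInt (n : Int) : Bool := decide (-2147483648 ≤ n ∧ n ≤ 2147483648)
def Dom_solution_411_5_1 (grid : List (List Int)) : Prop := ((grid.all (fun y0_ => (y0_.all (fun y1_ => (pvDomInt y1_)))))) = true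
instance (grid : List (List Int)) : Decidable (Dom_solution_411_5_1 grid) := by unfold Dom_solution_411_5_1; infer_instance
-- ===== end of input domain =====

-- B replaces A's shared-visited recursive DFS by an iterative per-component set-saturation
-- (frontier closure to a fixpoint) over a precomputed set of nonzero cells: alternative
-- algorithm, same return value on every input where A returns.

-- ===== PORT A =====
-- grid[i][j], read only after the guards established 0 ≤ i < len(grid), 0 ≤ j < len(grid[0]) ≤ len(grid[i]); exact there
def pvCellA (grid : List (List Int)) (i j : Int) : Int :=
  ((PySem.List.pyGet? ((PySem.List.pyGet? grid i).getD []) j).getD 0)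

-- solution_411_5_2: the recursive flood fill; fuel (= #cells+1) only makes the recursion
-- structural — the proof shows it never runs out on the calls the ports make
def pvDfsA (grid : List (List Int)) (m n : Int) :
    Nat → Int × Int → PySem.Dict (Int × Int) Bool → Int × PySem.Dict (Int × Int) Bool
  | 0, _, visited => (0, visited)
  | fuel+1, (i, j), visited =>
    if i < 0 ∨ m ≤ i ∨ j < 0 ∨ n ≤ j ∨ pvCellA grid i j = 0 ∨ visited.contains (i, j) then
      (0, visited)
    else
      let v1 := visited.insert (i, j) true
      let rl := pvDfsA grid m n fuel (i, j-1) v1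
      let rr := pvDfsA grid m n fuel (i, j+1) rl.2
      let rt := pvDfsA grid m n fuel (i-1, j) rr.2
      let rb := pvDfsA grid m n fuel (i+1, j) rt.2
      (1 + rl.1 + rr.1 + rt.1 + rb.1, rb.2)

def solution_411_5_1 (grid : List (List Int)) : Int :=
  let rowLength := (grid.headD []).length      -- len(grid[0]); IndexError on [] is excluded by Pre_
  let columnLength := grid.length
  let fuel := columnLength * rowLength + 1
  (((List.range columnLength).foldl (fun (st : Int × PySem.Dict (Int × Int) Bool) i =>
      (List.range rowLength).foldl (fun st j =>
        let r := pvDfsA grid (columnLength : Int) (rowLength : Int) fuel ((i : Int), (j : Int)) st.2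
        (max st.1 r.1, r.2)) st)
    ((0 : Int), PySem.Dict.empty))).1

-- ===== PORT B =====
def pvCellB (grid : List (List Int)) (i j : Int) : Int :=
  ((PySem.List.pyGet? ((PySem.List.pyGet? grid i).getD []) j).getD 0)

def pvNbrsB (p : Int × Int) : List (Int × Int) :=
  [(p.1, p.2 + 1), (p.1, p.2 - 1), (p.1 + 1, p.2), (p.1 - 1, p.2)]

def pvOnesB (grid : List (List Int)) : PySem.Set (Int × Int) :=
  PySem.Set.ofList ((List.range grid.length).flatMap (fun (i : Nat) =>
    (List.range (grid.headD []).length).filterMap (fun (j : Nat) =>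
      if pvCellB grid (i : Int) (j : Int) ≠ 0 then some ((i : Int), (j : Int)) else none)))

def pvGrowB (ones comp : PySem.Set (Int × Int)) : PySem.Set (Int × Int) :=
  PySem.Set.union comp (comp.flatMap (fun p => (pvNbrsB p).filter (fun q => PySem.Set.contains ones q)))

-- the 'while True' saturation loop; fuel = #cells+1 iterations always suffice to reach the fixpoint
def pvClosB (ones : PySem.Set (Int × Int)) :
    Nat → PySem.Set (Int × Int) → PySem.Set (Int × Int)
  | 0, comp => comp
  | fuel+1, comp =>
    let grown := pvGrowB ones comp
    if PySem.Set.equal grown comp then comp else pvClosB ones fuel grown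

def solution_411_5_1_alt (grid : List (List Int)) : Int :=
  let rowLength := (grid.headD []).length
  let columnLength := grid.length
  let ones := pvOnesB grid
  let fuel := columnLength * rowLength + 1
  (((List.range columnLength).foldl (fun (st : Int × PySem.Set (Int × Int)) i =>
      (List.range rowLength).foldl (fun (st : Int × PySem.Set (Int × Int)) j =>
        if ¬ (PySem.Set.contains ones ((i : Int), (j : Int)) = true)
            ∨ PySem.Set.contains st.2 ((i : Int), (j : Int)) = true then st
        else
          let comp := pvClosB ones fuel (PySem.Set.ofList [((i : Int), (j : Int))])
          (max st.1 (PySem.Set.len comp), PySem.Set.union st.2 comp)) st)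
    ((0 : Int), PySem.Set.empty))).1

-- ===== PRECONDITION & SPEC =====
-- Pre_ excludes exactly the inputs where the Python A raises IndexError: the empty grid
-- (grid[0]) and ragged grids having some row shorter than the first one (grid[i][j]).
def Pre_solution_411_5_1 (grid : List (List Int)) : Prop :=
  grid ≠ [] ∧ ∀ row ∈ grid, (grid.headD []).length ≤ row.length
instance (grid : List (List Int)) : Decidable (Pre_solution_411_5_1 grid) := by
  unfold Pre_solution_411_5_1; infer_instance

def pvWitness_solution_411_5_1 : List (List Int) := [[1, 1, 0], [0, 1, 0], [0, 0, 1]]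

def Spec_solution_411_5_1 (grid : List (List Int)) (out : Int) : Prop := out = solution_411_5_1_alt grid
instance (grid : List (List Int)) (out : Int) : Decidable (Spec_solution_411_5_1 grid out) := by
  unfold Spec_solution_411_5_1; infer_instance

-- ===== CLAIM (what is proved, stated in full; the proofs are below) =====
def Claim_equal_solution_411_5_1 : Prop := ∀ (grid : List (List Int)), Dom_solution_411_5_1 grid → Pre_solution_411_5_1 grid → Spec_solution_411_5_1 grid (solution_411_5_1 grid)


-- ===== LEMMAS AND PROOFS =====

-- ---- proof-side definitions: adjacency, saturation, reachability ----

-- neighbour list in A's visiting order (left, right, top, bottom)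
def pvAdjL (p : Int × Int) : List (Int × Int) :=
  [(p.1, p.2 - 1), (p.1, p.2 + 1), (p.1 - 1, p.2), (p.1 + 1, p.2)]

def pvAdj (p q : Int × Int) : Prop := q ∈ pvAdjL p

def pvStep (A : Finset (Int × Int)) (a b : Int × Int) : Prop := b ∈ A ∧ pvAdj a b

def pvSat (A F : Finset (Int × Int)) : Finset (Int × Int) :=
  F ∪ A.filter (fun q => ∃ x ∈ F, q ∈ pvAdjL x)

def pvSatN (A : Finset (Int × Int)) (p : Int × Int) : Nat → Finset (Int × Int)
  | 0 => {p}
  | k+1 => pvSat A (pvSatN A p k)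

def pvReach (A : Finset (Int × Int)) (p : Int × Int) : Finset (Int × Int) :=
  pvSatN A p A.card

def pvOnesF (grid : List (List Int)) : Finset (Int × Int) :=
  (((Finset.range grid.length) ×ˢ (Finset.range (grid.headD []).length)).image
      (fun ij => ((ij.1 : Int), (ij.2 : Int)))).filter
    (fun p => pvCellA grid p.1 p.2 ≠ 0)

def pvKeys (V : PySem.Dict (Int × Int) Bool) : Finset (Int × Int) := V.keys.toFinset

def pvNew (A S : Finset (Int × Int)) (q : Int × Int) : Finset (Int × Int) :=
  if q ∈ A \ S then pvReach (A \ S) q else ∅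

def pvNewList (A : Finset (Int × Int)) : Finset (Int × Int) → List (Int × Int) → Finset (Int × Int)
  | _, [] => ∅
  | S, q :: qs => pvNew A S q ∪ pvNewList A (S ∪ pvNew A S q) qs

def pvCells (grid : List (List Int)) : List (Int × Int) :=
  (List.range grid.length).flatMap (fun i =>
    (List.range (grid.headD []).length).map (fun j => ((i : Int), (j : Int))))

def pvStepA (grid : List (List Int)) (st : Int × PySem.Dict (Int × Int) Bool) (c : Int × Int) :
    Int × PySem.Dict (Int × Int) Bool :=
  let r := pvDfsA grid (grid.length : Int) ((grid.headD []).length : Int)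
      (grid.length * (grid.headD []).length + 1) c st.2
  (max st.1 r.1, r.2)

def pvStepB (grid : List (List Int)) (st : Int × PySem.Set (Int × Int)) (c : Int × Int) :
    Int × PySem.Set (Int × Int) :=
  if ¬ (PySem.Set.contains (pvOnesB grid) c = true) ∨ PySem.Set.contains st.2 c = true then st
  else
    let comp := pvClosB (pvOnesB grid) (grid.length * (grid.headD []).length + 1)
        (PySem.Set.ofList [c])
    (max st.1 (PySem.Set.len comp), PySem.Set.union st.2 comp)

-- ---- generic saturation lemmas ----

theorem pv_subset_sat (A F : Finset (Int × Int)) : F ⊆ pvSat A F :=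
  Finset.subset_union_left

theorem pv_satN_le (A : Finset (Int × Int)) (p : Int × Int) {k j : Nat} (h : k ≤ j) :
    pvSatN A p k ⊆ pvSatN A p j := by
  induction h with
  | refl => exact subset_rfl
  | step h ih => exact ih.trans (pv_subset_sat _ _)

theorem pv_satN_subset (A : Finset (Int × Int)) (p : Int × Int) (hp : p ∈ A) (k : Nat) :
    pvSatN A p k ⊆ A := by
  induction k with
  | zero => simpa [pvSatN] using hp
  | succ k ih => exact Finset.union_subset ih (Finset.filter_subset _ _)

theorem pv_sound (A : Finset (Int × Int)) (p : Int × Int) (k : Nat) :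
    ∀ q ∈ pvSatN A p k, Relation.ReflTransGen (pvStep A) p q := by
  induction k with
  | zero =>
    intro q hq
    simp only [pvSatN, Finset.mem_singleton] at hq
    subst hq; exact Relation.ReflTransGen.refl
  | succ k ih =>
    intro q hq
    rcases Finset.mem_union.1 hq with h | h
    · exact ih q h
    · rcases Finset.mem_filter.1 h with ⟨hqA, x, hx, hadj⟩
      exact (ih x hx).tail ⟨hqA, hadj⟩

theorem pv_stab (A : Finset (Int × Int)) (p : Int × Int) (k : Nat)
    (h : pvSatN A p (k+1) = pvSatN A p k) :
    ∀ j, k ≤ j → pvSatN A p j = pvSatN A p k := by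
  intro j hj
  induction hj with
  | refl => rfl
  | @step j hj ih => show pvSat A (pvSatN A p j) = _ ; rw [ih]; exact h

theorem pv_no_fix_absurd (A : Finset (Int × Int)) (p : Int × Int) (hp : p ∈ A)
    (h : ∀ k ≤ A.card, pvSatN A p (k+1) ≠ pvSatN A p k) : False := by
  have grow : ∀ k ≤ A.card, (pvSatN A p k).card < (pvSatN A p (k+1)).card := by
    intro k hk
    exact Finset.card_lt_card (Finset.ssubset_iff_subset_ne.2
      ⟨pv_satN_le A p (Nat.le_succ k), fun e => h k hk e.symm⟩)
  have key : ∀ k, k ≤ A.card + 1 → k + 1 ≤ (pvSatN A p k).card := by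
    intro k
    induction k with
    | zero => intro _; simp [pvSatN]
    | succ k ih =>
      intro hk
      have h1 := ih (by omega)
      have h2 := grow k (by omega)
      omega
  have h3 := key (A.card + 1) le_rfl
  have h4 := Finset.card_le_card (pv_satN_subset A p hp (A.card + 1))
  omega

theorem pv_reach_fix (A : Finset (Int × Int)) (p : Int × Int) (hp : p ∈ A) :
    pvSat A (pvReach A p) = pvReach A p := by
  by_contra hfix
  apply pv_no_fix_absurd A p hp
  intro k hk heq
  apply hfix
  have hstab := pv_stab A p k heq A.card hk
  show pvSatN A p (A.card + 1) = pvSatN A p A.card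
  rw [pv_stab A p k heq (A.card + 1) (by omega), hstab]

theorem pv_satN_stable_ge (A : Finset (Int × Int)) (p : Int × Int) (hp : p ∈ A)
    {j : Nat} (hj : A.card ≤ j) : pvSatN A p j = pvReach A p :=
  pv_stab A p A.card (pv_reach_fix A p hp) j hj

theorem pv_closed_mem (A F : Finset (Int × Int)) (hF : pvSat A F = F) {x y : Int × Int}
    (hx : x ∈ F) (hy : pvStep A x y) : y ∈ F := by
  have : y ∈ pvSat A F :=
    Finset.mem_union_right _ (Finset.mem_filter.2 ⟨hy.1, ⟨x, hx, hy.2⟩⟩)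
  rwa [hF] at this

theorem pv_rtg_mem (A F : Finset (Int × Int)) {p q : Int × Int} (hp : p ∈ F)
    (hF : pvSat A F = F) (h : Relation.ReflTransGen (pvStep A) p q) : q ∈ F := by
  induction h with
  | refl => exact hp
  | tail _ hbc ih => exact pv_closed_mem A F hF ih hbc

theorem pv_mem_reach (A : Finset (Int × Int)) (p : Int × Int) : p ∈ pvReach A p :=
  pv_satN_le A p (Nat.zero_le _) (by simp [pvSatN])

theorem pv_reach_iff (A : Finset (Int × Int)) (p : Int × Int) (hp : p ∈ A) (q : Int × Int) :
    q ∈ pvReach A p ↔ Relation.ReflTransGen (pvStep A) p q :=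
  ⟨fun h => pv_sound A p A.card q h,
   fun h => pv_rtg_mem A (pvReach A p) (pv_mem_reach A p) (pv_reach_fix A p hp) h⟩

theorem pv_rtg_mem_A (A : Finset (Int × Int)) {p q : Int × Int} (hp : p ∈ A)
    (h : Relation.ReflTransGen (pvStep A) p q) : q ∈ A := by
  induction h with
  | refl => exact hp
  | tail _ hbc _ => exact hbc.1

theorem pv_adj_symm {p q : Int × Int} (h : pvAdj p q) : pvAdj q p := by
  obtain ⟨a, b⟩ := p
  obtain ⟨c, d⟩ := q
  simp only [pvAdj, pvAdjL, List.mem_cons, List.not_mem_nil, or_false, Prod.mk.injEq] at h ⊢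
  omega

theorem pv_rtg_symm (A : Finset (Int × Int)) {p q : Int × Int} (hp : p ∈ A)
    (h : Relation.ReflTransGen (pvStep A) p q) : Relation.ReflTransGen (pvStep A) q p := by
  induction h with
  | refl => exact Relation.ReflTransGen.refl
  | @tail b c hab hbc ih =>
    have hbA : b ∈ A := pv_rtg_mem_A A hp hab
    exact Relation.ReflTransGen.head ⟨hbA, pv_adj_symm hbc.2⟩ ih

theorem pv_comp_eq (A : Finset (Int × Int)) {p q : Int × Int} (hp : p ∈ A)
    (hq : q ∈ pvReach A p) : pvReach A q = pvReach A p := by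
  have hq' : Relation.ReflTransGen (pvStep A) p q := (pv_reach_iff A p hp q).1 hq
  have hqA : q ∈ A := pv_rtg_mem_A A hp hq'
  ext r
  rw [pv_reach_iff A q hqA r, pv_reach_iff A p hp r]
  exact ⟨fun h => hq'.trans h, fun h => (pv_rtg_symm A hp hq').trans h⟩

theorem pv_reach_avoid (A S : Finset (Int × Int)) (p : Int × Int) (hp1 : p ∈ A) (hpS : p ∉ S)
    (hS : ∀ q ∈ pvReach A p, q ∉ S) : pvReach (A \ S) p = pvReach A p := by
  have hpAS : p ∈ A \ S := Finset.mem_sdiff.2 ⟨hp1, hpS⟩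
  ext q
  rw [pv_reach_iff _ _ hpAS q, pv_reach_iff _ _ hp1 q]
  constructor
  · exact Relation.ReflTransGen.mono (fun a b hb => ⟨(Finset.mem_sdiff.1 hb.1).1, hb.2⟩)
  · intro h
    induction h with
    | refl => exact Relation.ReflTransGen.refl
    | @tail b c hab hbc ih =>
      have hcR : c ∈ pvReach A p := (pv_reach_iff A p hp1 c).2 (hab.tail hbc)
      exact ih.tail ⟨Finset.mem_sdiff.2 ⟨hbc.1, hS c hcR⟩, hbc.2⟩

-- ---- pvNew / pvNewList lemmas ----

theorem pv_new_subset (A S : Finset (Int × Int)) (q : Int × Int) : pvNew A S q ⊆ A \ S := by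
  unfold pvNew
  split
  · next h => exact pv_satN_subset (A \ S) q h _
  · exact Finset.empty_subset _

theorem pv_newList_subset (A : Finset (Int × Int)) :
    ∀ (qs : List (Int × Int)) (S : Finset (Int × Int)), pvNewList A S qs ⊆ A \ S := by
  intro qs
  induction qs with
  | nil => intro S; exact Finset.empty_subset _
  | cons q qs ih =>
    intro S
    refine Finset.union_subset (pv_new_subset A S q) ?_
    exact (ih (S ∪ pvNew A S q)).trans
      (Finset.sdiff_subset_sdiff Finset.Subset.rfl Finset.subset_union_left)

theorem pv_newList_sub_rtg (A : Finset (Int × Int)) :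
    ∀ (qs : List (Int × Int)) (S S' : Finset (Int × Int)) (p : Int × Int),
      insert p S ⊆ S' → p ∉ S → (∀ q ∈ qs, pvAdj p q) →
      ∀ r ∈ pvNewList A S' qs, Relation.ReflTransGen (pvStep (A \ S)) p r := by
  intro qs
  induction qs with
  | nil => intro S S' p _ _ _ r hr; simp [pvNewList] at hr
  | cons q qs ih =>
    intro S S' p hsub hpS hadj r hr
    rcases Finset.mem_union.1 hr with hr | hr
    · unfold pvNew at hr
      split at hr
      · next hq =>
        have hq' : q ∈ A \ S' := hq
        have hrtg : Relation.ReflTransGen (pvStep (A \ S')) q r :=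
          (pv_reach_iff _ _ hq' r).1 hr
        have hSS' : S ⊆ S' := (Finset.insert_subset_iff.1 hsub).2
        have hmono : Relation.ReflTransGen (pvStep (A \ S)) q r :=
          hrtg.mono (fun a b hb =>
            ⟨Finset.mem_sdiff.2 ⟨(Finset.mem_sdiff.1 hb.1).1,
              fun hbS => (Finset.mem_sdiff.1 hb.1).2 (hSS' hbS)⟩, hb.2⟩)
        have hqA : q ∈ A := (Finset.mem_sdiff.1 hq').1
        have hqS : q ∉ S := fun hqs => (Finset.mem_sdiff.1 hq').2 (hSS' hqs)
        exact Relation.ReflTransGen.head ⟨Finset.mem_sdiff.2 ⟨hqA, hqS⟩,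
          hadj q (List.mem_cons_self)⟩ hmono
      · simp at hr
    · exact ih S (S' ∪ pvNew A S' q) p
        (hsub.trans Finset.subset_union_left) hpS
        (fun x hx => hadj x (List.mem_cons_of_mem _ hx)) r hr

theorem pv_newList_compl (A : Finset (Int × Int)) :
    ∀ (qs : List (Int × Int)) (S' : Finset (Int × Int)) (q : Int × Int),
      q ∈ qs → q ∈ A → q ∈ S' ∪ pvNewList A S' qs := by
  intro qs
  induction qs with
  | nil => intro S' q hq _; simp at hq
  | cons q0 qs ih =>
    intro S' q hq hqA
    rcases List.mem_cons.1 hq with rfl | hq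
    · by_cases hS : q ∈ S'
      · exact Finset.mem_union_left _ hS
      · refine Finset.mem_union_right _ (Finset.mem_union_left _ ?_)
        unfold pvNew
        rw [if_pos (Finset.mem_sdiff.2 ⟨hqA, hS⟩)]
        exact pv_mem_reach _ q
    · have h := ih (S' ∪ pvNew A S' q0) q hq hqA
      have : pvNewList A S' (q0 :: qs) = pvNew A S' q0 ∪ pvNewList A (S' ∪ pvNew A S' q0) qs := rfl
      rw [this, ← Finset.union_assoc]
      exact h

theorem pv_newList_closed (A : Finset (Int × Int)) :
    ∀ (qs : List (Int × Int)) (S' : Finset (Int × Int)) (x y : Int × Int),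
      x ∈ pvNewList A S' qs → y ∈ A → pvAdj x y → y ∈ S' ∪ pvNewList A S' qs := by
  intro qs
  induction qs with
  | nil => intro S' x y hx _ _; simp [pvNewList] at hx
  | cons q qs ih =>
    intro S' x y hx hyA hadj
    have hrw : pvNewList A S' (q :: qs) = pvNew A S' q ∪ pvNewList A (S' ∪ pvNew A S' q) qs := rfl
    rw [hrw] at hx ⊢
    rcases Finset.mem_union.1 hx with hx | hx
    · by_cases hy : y ∈ S' ∪ (pvNew A S' q ∪ pvNewList A (S' ∪ pvNew A S' q) qs)
      · exact hy
      · exfalso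
        simp only [Finset.mem_union, not_or] at hy
        obtain ⟨hyS, hyN, _⟩ := hy
        unfold pvNew at hx
        split at hx
        · next hq =>
          have hfix := pv_reach_fix (A \ S') q hq
          have : y ∈ pvReach (A \ S') q :=
            pv_closed_mem (A \ S') _ hfix hx ⟨Finset.mem_sdiff.2 ⟨hyA, hyS⟩, hadj⟩
          apply hyN
          unfold pvNew
          rw [if_pos hq]
          exact this
        · simp at hx
    · have h := ih (S' ∪ pvNew A S' q) x y hx hyA hadj
      rwa [Finset.union_assoc] at h

theorem pv_decomp (A S : Finset (Int × Int)) (p : Int × Int) (hp : p ∈ A \ S) :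
    pvReach (A \ S) p = insert p (pvNewList A (insert p S) (pvAdjL p)) := by
  have hp1 : p ∈ A := (Finset.mem_sdiff.1 hp).1
  have hpS : p ∉ S := (Finset.mem_sdiff.1 hp).2
  ext r
  constructor
  · intro hr
    have h := (pv_reach_iff _ _ hp r).1 hr
    clear hr
    induction h with
    | refl => exact Finset.mem_insert_self _ _
    | @tail b c hab hbc ih =>
      have hcA : c ∈ A := (Finset.mem_sdiff.1 hbc.1).1
      have hcS : c ∉ S := (Finset.mem_sdiff.1 hbc.1).2
      rcases Finset.mem_insert.1 ih with rfl | hb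
      · have hcadj : c ∈ pvAdjL b := hbc.2
        have h := pv_newList_compl A (pvAdjL b) (insert b S) c hcadj hcA
        rcases Finset.mem_union.1 h with h | h
        · rcases Finset.mem_insert.1 h with rfl | h
          · exact Finset.mem_insert_self _ _
          · exact absurd h hcS
        · exact Finset.mem_insert_of_mem h
      · have h := pv_newList_closed A (pvAdjL p) (insert p S) b c hb hcA hbc.2
        rcases Finset.mem_union.1 h with h | h
        · rcases Finset.mem_insert.1 h with rfl | h
          · exact Finset.mem_insert_self _ _
          · exact absurd h hcS
        · exact Finset.mem_insert_of_mem h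
  · intro hr
    rcases Finset.mem_insert.1 hr with rfl | hr
    · exact pv_mem_reach _ _
    · exact (pv_reach_iff _ _ hp r).2
        (pv_newList_sub_rtg A (pvAdjL p) S (insert p S) p subset_rfl hpS
          (fun q hq => hq) r hr)

theorem pv_newList_card_cons (A S' : Finset (Int × Int)) (q : Int × Int) (qs : List (Int × Int)) :
    (pvNewList A S' (q :: qs)).card
      = (pvNew A S' q).card + (pvNewList A (S' ∪ pvNew A S' q) qs).card := by
  have hrw : pvNewList A S' (q :: qs) = pvNew A S' q ∪ pvNewList A (S' ∪ pvNew A S' q) qs := rfl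
  rw [hrw]
  apply Finset.card_union_of_disjoint
  rw [Finset.disjoint_left]
  intro a ha hb
  have h1 := pv_newList_subset A qs (S' ∪ pvNew A S' q) hb
  exact (Finset.mem_sdiff.1 h1).2 (Finset.mem_union_right _ ha)

-- ---- the grid's one-cells ----

theorem pv_mem_onesF (grid : List (List Int)) (p : Int × Int) :
    p ∈ pvOnesF grid ↔
      0 ≤ p.1 ∧ p.1 < (grid.length : Int) ∧ 0 ≤ p.2 ∧ p.2 < ((grid.headD []).length : Int) ∧
        pvCellA grid p.1 p.2 ≠ 0 := by
  unfold pvOnesF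
  simp only [Finset.mem_filter, Finset.mem_image, Finset.mem_product, Finset.mem_range]
  constructor
  · rintro ⟨⟨⟨a, b⟩, ⟨ha, hb⟩, rfl⟩, hcell⟩
    have h2 : ((a : Int)) < (grid.length : Int) := by exact_mod_cast ha
    have h4 : ((b : Int)) < ((grid.headD []).length : Int) := by exact_mod_cast hb
    exact ⟨Int.natCast_nonneg a, h2, Int.natCast_nonneg b, h4, hcell⟩
  · rintro ⟨h1, h2, h3, h4, h5⟩
    refine ⟨⟨⟨p.1.toNat, p.2.toNat⟩, ⟨by omega, by omega⟩, ?_⟩, h5⟩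
    simp only [Int.toNat_of_nonneg h1, Int.toNat_of_nonneg h3]

theorem pv_onesF_card (grid : List (List Int)) :
    (pvOnesF grid).card ≤ grid.length * (grid.headD []).length := by
  unfold pvOnesF
  refine le_trans (Finset.card_filter_le _ _) (le_trans Finset.card_image_le ?_)
  simp [Finset.card_product]

-- ---- DFS (port A) characterisation ----

theorem pv_keys_insert (V : PySem.Dict (Int × Int) Bool) (p : Int × Int) (v : Bool) :
    pvKeys (V.insert p v) = insert p (pvKeys V) := by
  ext q
  simp [pvKeys, List.mem_toFinset, PySem.Dict.mem_keys_insert]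

theorem pv_guard_iff (grid : List (List Int)) (p : Int × Int) (V : PySem.Dict (Int × Int) Bool) :
    (p.1 < 0 ∨ (grid.length : Int) ≤ p.1 ∨ p.2 < 0 ∨ ((grid.headD []).length : Int) ≤ p.2 ∨
        pvCellA grid p.1 p.2 = 0 ∨ V.contains p = true)
      ↔ p ∉ pvOnesF grid \ pvKeys V := by
  rw [Finset.mem_sdiff, pv_mem_onesF]
  have hc : V.contains p = true ↔ p ∈ pvKeys V := by
    rw [PySem.Dict.contains_iff_mem_keys, pvKeys, List.mem_toFinset]
  rw [hc]
  constructor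
  · rintro (h | h | h | h | h | h) ⟨⟨h1, h2, h3, h4, h5⟩, hk⟩
    · omega
    · omega
    · omega
    · omega
    · exact h5 h
    · exact hk h
  · intro h
    by_contra hng
    push_neg at hng
    obtain ⟨h1, h2, h3, h4, h5, h6⟩ := hng
    exact h ⟨⟨by omega, by omega, by omega, by omega, h5⟩, h6⟩

set_option maxHeartbeats 1000000 in
theorem pv_dfsA_spec (grid : List (List Int)) :
    ∀ (fuel : Nat) (p : Int × Int) (V : PySem.Dict (Int × Int) Bool),
      V.keys.Nodup → (pvOnesF grid \ pvKeys V).card < fuel →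
      (pvDfsA grid (grid.length : Int) ((grid.headD []).length : Int) fuel p V).2.keys.Nodup ∧
      pvKeys (pvDfsA grid (grid.length : Int) ((grid.headD []).length : Int) fuel p V).2
        = pvKeys V ∪ pvNew (pvOnesF grid) (pvKeys V) p ∧
      (pvDfsA grid (grid.length : Int) ((grid.headD []).length : Int) fuel p V).1
        = (((pvNew (pvOnesF grid) (pvKeys V) p).card : Int)) := by
  intro fuel
  induction fuel with
  | zero => intro p V _ hcard; exact absurd hcard (by omega)
  | succ fuel ih =>
    intro p V hnd hcard
    obtain ⟨i, j⟩ := p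
    by_cases hg : (i < 0 ∨ (grid.length : Int) ≤ i ∨ j < 0 ∨ ((grid.headD []).length : Int) ≤ j ∨
        pvCellA grid i j = 0 ∨ V.contains (i, j) = true)
    · have hbad : (i, j) ∉ pvOnesF grid \ pvKeys V := (pv_guard_iff grid (i, j) V).1 hg
      simp only [pvDfsA]
      rw [if_pos hg]
      dsimp only
      refine ⟨hnd, ?_, ?_⟩
      · rw [pvNew, if_neg hbad, Finset.union_empty]
      · rw [pvNew, if_neg hbad]; simp
    · have hgood : (i, j) ∈ pvOnesF grid \ pvKeys V := by
        by_contra hx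
        exact hg ((pv_guard_iff grid (i, j) V).2 hx)
      simp only [pvDfsA]
      rw [if_neg hg]
      dsimp only
      set v1 := V.insert (i, j) true with hv1
      set d1 := pvDfsA grid (grid.length : Int) ((grid.headD []).length : Int) fuel (i, j - 1) v1 with hd1
      set d2 := pvDfsA grid (grid.length : Int) ((grid.headD []).length : Int) fuel (i, j + 1) d1.2 with hd2
      set d3 := pvDfsA grid (grid.length : Int) ((grid.headD []).length : Int) fuel (i - 1, j) d2.2 with hd3
      set d4 := pvDfsA grid (grid.length : Int) ((grid.headD []).length : Int) fuel (i + 1, j) d3.2 with hd4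
      have hk1 : pvKeys v1 = insert (i, j) (pvKeys V) := pv_keys_insert V (i, j) true
      have hnd1 : v1.keys.Nodup := PySem.Dict.nodup_keys_insert V (i, j) true hnd
      have hcard1 : (pvOnesF grid \ insert (i, j) (pvKeys V)).card < fuel := by
        have he : pvOnesF grid \ insert (i, j) (pvKeys V)
            = (pvOnesF grid \ pvKeys V).erase (i, j) := Finset.sdiff_insert _ _ _
        have hpos : 0 < (pvOnesF grid \ pvKeys V).card := Finset.card_pos.2 ⟨(i, j), hgood⟩
        rw [he, Finset.card_erase_of_mem hgood]
        omega
      have hstepcard : ∀ (S T : Finset (Int × Int)),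
          (pvOnesF grid \ S).card < fuel → (pvOnesF grid \ (S ∪ T)).card < fuel :=
        fun S T h => lt_of_le_of_lt (Finset.card_le_card
          (Finset.sdiff_subset_sdiff Finset.Subset.rfl Finset.subset_union_left)) h
      -- call 1: (i, j-1)
      obtain ⟨hnd2, hk2, hv2⟩ := ih (i, j - 1) v1 hnd1 (by rw [hk1]; exact hcard1)
      rw [← hd1] at hnd2 hk2 hv2
      rw [hk1] at hk2 hv2
      -- call 2: (i, j+1)
      obtain ⟨hnd3, hk3, hv3⟩ := ih (i, j + 1) d1.2 hnd2
        (by rw [hk2]; exact hstepcard _ _ hcard1)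
      rw [← hd2] at hnd3 hk3 hv3
      rw [hk2] at hk3 hv3
      -- call 3: (i-1, j)
      obtain ⟨hnd4, hk4, hv4⟩ := ih (i - 1, j) d2.2 hnd3
        (by rw [hk3]; exact hstepcard _ _ (hstepcard _ _ hcard1))
      rw [← hd3] at hnd4 hk4 hv4
      rw [hk3] at hk4 hv4
      -- call 4: (i+1, j)
      obtain ⟨hnd5, hk5, hv5⟩ := ih (i + 1, j) d3.2 hnd4
        (by rw [hk4]; exact hstepcard _ _ (hstepcard _ _ (hstepcard _ _ hcard1)))
      rw [← hd4] at hnd5 hk5 hv5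
      rw [hk4] at hk5 hv5
      -- the decomposition of the reachable set
      have hadjL : pvAdjL (i, j) = [(i, j - 1), (i, j + 1), (i - 1, j), (i + 1, j)] := rfl
      have hdec : pvReach (pvOnesF grid \ pvKeys V) (i, j)
          = insert (i, j) (pvNewList (pvOnesF grid) (insert (i, j) (pvKeys V)) (pvAdjL (i, j))) :=
        pv_decomp (pvOnesF grid) (pvKeys V) (i, j) hgood
      have hNL : pvNewList (pvOnesF grid) (insert (i, j) (pvKeys V)) (pvAdjL (i, j))
          = pvNew (pvOnesF grid) (insert (i, j) (pvKeys V)) (i, j - 1)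
            ∪ (pvNew (pvOnesF grid)
                (insert (i, j) (pvKeys V)
                  ∪ pvNew (pvOnesF grid) (insert (i, j) (pvKeys V)) (i, j - 1)) (i, j + 1)
              ∪ (pvNew (pvOnesF grid)
                  (insert (i, j) (pvKeys V)
                    ∪ pvNew (pvOnesF grid) (insert (i, j) (pvKeys V)) (i, j - 1)
                    ∪ pvNew (pvOnesF grid)
                        (insert (i, j) (pvKeys V)
                          ∪ pvNew (pvOnesF grid) (insert (i, j) (pvKeys V)) (i, j - 1)) (i, j + 1))
                  (i - 1, j)
                ∪ (pvNew (pvOnesF grid)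
                    (insert (i, j) (pvKeys V)
                      ∪ pvNew (pvOnesF grid) (insert (i, j) (pvKeys V)) (i, j - 1)
                      ∪ pvNew (pvOnesF grid)
                          (insert (i, j) (pvKeys V)
                            ∪ pvNew (pvOnesF grid) (insert (i, j) (pvKeys V)) (i, j - 1)) (i, j + 1)
                      ∪ pvNew (pvOnesF grid)
                          (insert (i, j) (pvKeys V)
                            ∪ pvNew (pvOnesF grid) (insert (i, j) (pvKeys V)) (i, j - 1)
                            ∪ pvNew (pvOnesF grid)
                                (insert (i, j) (pvKeys V)
                                  ∪ pvNew (pvOnesF grid) (insert (i, j) (pvKeys V)) (i, j - 1))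
                                (i, j + 1)) (i - 1, j)) (i + 1, j) ∪ ∅))) := by
        rw [hadjL]
        simp only [pvNewList, Finset.union_assoc]
      have hnew : pvNew (pvOnesF grid) (pvKeys V) (i, j)
          = insert (i, j)
              (pvNewList (pvOnesF grid) (insert (i, j) (pvKeys V)) (pvAdjL (i, j))) := by
        rw [pvNew, if_pos hgood, hdec]
      refine ⟨hnd5, ?_, ?_⟩
      · -- keyset equation
        rw [hk5, hnew, hNL]
        simp only [Finset.insert_union, Finset.union_insert, Finset.union_empty,
          Finset.union_assoc]
      · -- value equation
        rw [hv2, hv3, hv4, hv5, hnew]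
        have hnotin : (i, j) ∉ pvNewList (pvOnesF grid) (insert (i, j) (pvKeys V)) (pvAdjL (i, j)) := by
          intro hx
          have h := pv_newList_subset (pvOnesF grid) (pvAdjL (i, j)) (insert (i, j) (pvKeys V)) hx
          exact (Finset.mem_sdiff.1 h).2 (Finset.mem_insert_self _ _)
        rw [Finset.card_insert_of_notMem hnotin, hadjL]
        rw [pv_newList_card_cons, pv_newList_card_cons, pv_newList_card_cons,
          pv_newList_card_cons]
        simp only [pvNewList, Finset.card_empty]
        push_cast
        ring

-- ---- port B's ones set and closure ----

theorem pv_cellB_eq (grid : List (List Int)) (i j : Int) :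
    pvCellB grid i j = pvCellA grid i j := rfl

theorem pv_onesB_mem (grid : List (List Int)) (q : Int × Int) :
    q ∈ pvOnesB grid ↔ q ∈ pvOnesF grid := by
  rw [pv_mem_onesF]
  unfold pvOnesB
  rw [PySem.Set.mem_ofList]
  constructor
  · intro h
    obtain ⟨i, hi, hq⟩ := List.mem_flatMap.1 h
    obtain ⟨j, hj, hq2⟩ := List.mem_filterMap.1 hq
    rw [List.mem_range] at hi hj
    rw [pv_cellB_eq] at hq2
    split at hq2
    · next h5 =>
      obtain rfl := Option.some.inj hq2
      have h2 : ((i : Int)) < (grid.length : Int) := by exact_mod_cast hi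
      have h4 : ((j : Int)) < ((grid.headD []).length : Int) := by exact_mod_cast hj
      exact ⟨Int.natCast_nonneg i, h2, Int.natCast_nonneg j, h4, h5⟩
    · exact absurd hq2 (by simp)
  · rintro ⟨h1, h2, h3, h4, h5⟩
    refine List.mem_flatMap.2 ⟨q.1.toNat, List.mem_range.2 (by omega), ?_⟩
    refine List.mem_filterMap.2 ⟨q.2.toNat, List.mem_range.2 (by omega), ?_⟩
    rw [pv_cellB_eq, Int.toNat_of_nonneg h1, Int.toNat_of_nonneg h3, if_pos h5]

theorem pv_nbrsB_mem (p q : Int × Int) : q ∈ pvNbrsB p ↔ pvAdj p q := by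
  obtain ⟨a, b⟩ := p
  simp only [pvNbrsB, pvAdj, pvAdjL, List.mem_cons, List.not_mem_nil, or_false]
  tauto

theorem pv_growB_toFinset (grid : List (List Int)) (comp : PySem.Set (Int × Int)) :
    (pvGrowB (pvOnesB grid) comp : List (Int × Int)).toFinset = pvSat (pvOnesF grid) comp.toFinset := by
  ext x
  rw [List.mem_toFinset]
  constructor
  · intro h
    rcases (PySem.Set.mem_union _ _ x).1 h with h | h
    · exact Finset.mem_union_left _ (List.mem_toFinset.2 h)
    · obtain ⟨p, hp, hx⟩ := List.mem_flatMap.1 h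
      rw [List.mem_filter] at hx
      obtain ⟨hxn, hone⟩ := hx
      refine Finset.mem_union_right _ (Finset.mem_filter.2
        ⟨?_, p, List.mem_toFinset.2 hp, (pv_nbrsB_mem p x).1 hxn⟩)
      exact (pv_onesB_mem grid x).1 ((PySem.Set.contains_iff _ _).1 hone)
  · intro h
    rcases Finset.mem_union.1 h with h | h
    · exact (PySem.Set.mem_union _ _ x).2 (Or.inl (List.mem_toFinset.1 h))
    · obtain ⟨hxA, p, hp, hadj⟩ := Finset.mem_filter.1 h
      refine (PySem.Set.mem_union _ _ x).2 (Or.inr ?_)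
      refine List.mem_flatMap.2 ⟨p, List.mem_toFinset.1 hp, ?_⟩
      rw [List.mem_filter]
      exact ⟨(pv_nbrsB_mem p x).2 hadj,
        (PySem.Set.contains_iff _ _).2 ((pv_onesB_mem grid x).2 hxA)⟩

theorem pv_growB_nodup (grid : List (List Int)) (comp : PySem.Set (Int × Int))
    (h : (comp : List (Int × Int)).Nodup) : (pvGrowB (pvOnesB grid) comp : List (Int × Int)).Nodup :=
  PySem.Set.nodup_union _ _ h

theorem pv_closB_run (grid : List (List Int)) (c : Int × Int) (hc : c ∈ pvOnesF grid) :
    ∀ (fuel : Nat) (comp : PySem.Set (Int × Int)) (k : Nat),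
      (comp : List (Int × Int)).Nodup →
      (comp : List (Int × Int)).toFinset = pvSatN (pvOnesF grid) c k →
      (pvOnesF grid).card + 1 ≤ fuel + k →
      (pvClosB (pvOnesB grid) fuel comp : List (Int × Int)).Nodup ∧
      (pvClosB (pvOnesB grid) fuel comp : List (Int × Int)).toFinset = pvReach (pvOnesF grid) c := by
  intro fuel
  induction fuel with
  | zero =>
    intro comp k hnd htf hcard
    refine ⟨hnd, ?_⟩
    show (comp : List (Int × Int)).toFinset = _
    rw [htf]
    exact pv_satN_stable_ge (pvOnesF grid) c hc (by omega)
  | succ fuel ih =>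
    intro comp k hnd htf hcard
    have hstep : pvClosB (pvOnesB grid) (fuel + 1) comp
        = if PySem.Set.equal (pvGrowB (pvOnesB grid) comp) comp then comp
          else pvClosB (pvOnesB grid) fuel (pvGrowB (pvOnesB grid) comp) := rfl
    rw [hstep]
    by_cases heq : PySem.Set.equal (pvGrowB (pvOnesB grid) comp) comp = true
    · rw [if_pos heq]
      have hmem := (PySem.Set.equal_iff _ _).1 heq
      have htfe : (pvGrowB (pvOnesB grid) comp : List (Int × Int)).toFinset
          = (comp : List (Int × Int)).toFinset := by
        ext x; rw [List.mem_toFinset, List.mem_toFinset]; exact hmem x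
      rw [pv_growB_toFinset, htf] at htfe
      have hfix : pvSatN (pvOnesF grid) c (k+1) = pvSatN (pvOnesF grid) c k := htfe
      refine ⟨hnd, ?_⟩
      rw [htf]
      rcases Nat.le_total k (pvOnesF grid).card with hk | hk
      · exact (pv_stab (pvOnesF grid) c k hfix (pvOnesF grid).card hk).symm
      · exact pv_satN_stable_ge (pvOnesF grid) c hc hk
    · rw [if_neg heq]
      refine ih (pvGrowB (pvOnesB grid) comp) (k+1) (pv_growB_nodup grid comp hnd) ?_ (by omega)
      rw [pv_growB_toFinset, htf]
      rfl

theorem pv_closB_spec (grid : List (List Int)) (c : Int × Int) (hc : c ∈ pvOnesF grid) :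
    (pvClosB (pvOnesB grid) (grid.length * (grid.headD []).length + 1)
        (PySem.Set.ofList [c]) : List (Int × Int)).Nodup ∧
    (pvClosB (pvOnesB grid) (grid.length * (grid.headD []).length + 1)
        (PySem.Set.ofList [c]) : List (Int × Int)).toFinset = pvReach (pvOnesF grid) c := by
  apply pv_closB_run grid c hc _ _ 0 (PySem.Set.nodup_ofList [c])
  · ext x
    simp only [List.mem_toFinset, PySem.Set.mem_ofList, List.mem_singleton]
    show _ ↔ x ∈ ({c} : Finset (Int × Int))
    simp
  · have := pv_onesF_card grid
    omega

-- ---- the simulation of the two outer scans ----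

theorem pv_foldl_nested {σ : Type} (g : σ → (Int × Int) → σ) (M N : Nat) (init : σ) :
    (List.range M).foldl (fun st i => (List.range N).foldl
        (fun st j => g st ((i : Int), (j : Int))) st) init
      = ((List.range M).flatMap (fun i =>
          (List.range N).map (fun j => ((i : Int), (j : Int))))).foldl g init := by
  rw [List.foldl_flatMap]
  simp [List.foldl_map]

theorem pv_sim (grid : List (List Int)) :
    ∀ (cells : List (Int × Int)) (stA : Int × PySem.Dict (Int × Int) Bool)
      (stB : Int × PySem.Set (Int × Int)),
      stA.1 = stB.1 → 0 ≤ stA.1 → stA.2.keys.Nodup → (stB.2 : List (Int × Int)).Nodup →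
      (∀ q, q ∈ pvKeys stA.2 ↔ q ∈ stB.2) →
      (∀ q ∈ pvKeys stA.2, q ∈ pvOnesF grid) →
      (∀ q r, q ∈ pvKeys stA.2 → Relation.ReflTransGen (pvStep (pvOnesF grid)) q r →
        r ∈ pvKeys stA.2) →
      (cells.foldl (pvStepA grid) stA).1 = (cells.foldl (pvStepB grid) stB).1 := by
  intro cells
  induction cells with
  | nil => intro stA stB h1 _ _ _ _ _ _; exact h1
  | cons c cells ih =>
    intro stA stB hv h0 hndA hndB hmem hsub hclosed
    simp only [List.foldl_cons]
    have hfuel : (pvOnesF grid \ pvKeys stA.2).card < grid.length * (grid.headD []).length + 1 := by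
      have h1 : (pvOnesF grid \ pvKeys stA.2).card ≤ (pvOnesF grid).card :=
        Finset.card_le_card Finset.sdiff_subset
      have h2 := pv_onesF_card grid
      omega
    obtain ⟨hnd', hk', hv'⟩ := pv_dfsA_spec grid (grid.length * (grid.headD []).length + 1)
      c stA.2 hndA hfuel
    have hstepA : pvStepA grid stA c
        = (max stA.1 ((pvNew (pvOnesF grid) (pvKeys stA.2) c).card : Int),
           (pvDfsA grid (grid.length : Int) ((grid.headD []).length : Int)
             (grid.length * (grid.headD []).length + 1) c stA.2).2) := by
      show (max stA.1 (pvDfsA grid (grid.length : Int) ((grid.headD []).length : Int)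
             (grid.length * (grid.headD []).length + 1) c stA.2).1,
           (pvDfsA grid (grid.length : Int) ((grid.headD []).length : Int)
             (grid.length * (grid.headD []).length + 1) c stA.2).2) = _
      rw [hv']
    by_cases hcone : c ∈ pvOnesF grid
    · by_cases hcseen : c ∈ pvKeys stA.2
      · -- already visited: both sides are inert
        have hempty : pvNew (pvOnesF grid) (pvKeys stA.2) c = ∅ := by
          rw [pvNew, if_neg]
          intro hx
          exact (Finset.mem_sdiff.1 hx).2 hcseen
        have hstepB : pvStepB grid stB c = stB := by
          unfold pvStepB
          rw [if_pos (Or.inr ((PySem.Set.contains_iff _ _).2 ((hmem c).1 hcseen)))]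
        rw [hstepB, hstepA, hempty]
        refine ih _ _ ?_ ?_ ?_ ?_ ?_ ?_ ?_
        · show max stA.1 ((∅ : Finset (Int × Int)).card : Int) = stB.1
          simp only [Finset.card_empty, Nat.cast_zero]
          rw [max_eq_left h0, hv]
        · show 0 ≤ max stA.1 ((∅ : Finset (Int × Int)).card : Int)
          exact le_trans h0 (le_max_left _ _)
        · exact hnd'
        · exact hndB
        · intro q
          show q ∈ pvKeys (pvDfsA grid (grid.length : Int) ((grid.headD []).length : Int)
             (grid.length * (grid.headD []).length + 1) c stA.2).2 ↔ q ∈ stB.2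
          rw [hk', hempty, Finset.union_empty]; exact hmem q
        · intro q hq
          rw [show pvKeys (pvDfsA grid (grid.length : Int) ((grid.headD []).length : Int)
             (grid.length * (grid.headD []).length + 1) c stA.2).2
             = pvKeys stA.2 from by rw [hk', hempty, Finset.union_empty]] at hq
          exact hsub q hq
        · intro q r hq hr
          rw [show pvKeys (pvDfsA grid (grid.length : Int) ((grid.headD []).length : Int)
             (grid.length * (grid.headD []).length + 1) c stA.2).2
             = pvKeys stA.2 from by rw [hk', hempty, Finset.union_empty]] at hq ⊢
          exact hclosed q r hq hr
      · -- fresh component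
        have hcS' : ∀ q ∈ pvReach (pvOnesF grid) c, q ∉ pvKeys stA.2 := by
          intro q hq hqS
          have hqA : q ∈ pvOnesF grid := hsub q hqS
          have hrtg : Relation.ReflTransGen (pvStep (pvOnesF grid)) c q :=
            (pv_reach_iff (pvOnesF grid) c hcone q).1 hq
          have hback : Relation.ReflTransGen (pvStep (pvOnesF grid)) q c :=
            pv_rtg_symm (pvOnesF grid) hcone hrtg
          exact hcseen (hclosed q c hqS hback)
        have havoid : pvNew (pvOnesF grid) (pvKeys stA.2) c = pvReach (pvOnesF grid) c := by
          rw [pvNew, if_pos (Finset.mem_sdiff.2 ⟨hcone, hcseen⟩)]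
          exact pv_reach_avoid (pvOnesF grid) (pvKeys stA.2) c hcone hcseen hcS'
        obtain ⟨hcnd, hctf⟩ := pv_closB_spec grid c hcone
        have hcm : ∀ x : Int × Int,
            x ∈ (pvClosB (pvOnesB grid) (grid.length * (grid.headD []).length + 1)
              (PySem.Set.ofList [c]) : List (Int × Int)) ↔ x ∈ pvReach (pvOnesF grid) c := by
          intro x
          rw [← hctf, List.mem_toFinset]
        have hstepB : pvStepB grid stB c
            = (max stB.1 (PySem.Set.len (pvClosB (pvOnesB grid)
                  (grid.length * (grid.headD []).length + 1) (PySem.Set.ofList [c]))),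
               PySem.Set.union stB.2 (pvClosB (pvOnesB grid)
                  (grid.length * (grid.headD []).length + 1) (PySem.Set.ofList [c]))) := by
          unfold pvStepB
          rw [if_neg]
          intro hor
          rcases hor with h | h
          · exact h ((PySem.Set.contains_iff _ _).2 ((pv_onesB_mem grid c).2 hcone))
          · exact hcseen ((hmem c).2 ((PySem.Set.contains_iff _ _).1 h))
        have hlen : PySem.Set.len (pvClosB (pvOnesB grid)
              (grid.length * (grid.headD []).length + 1) (PySem.Set.ofList [c]))
            = ((pvReach (pvOnesF grid) c).card : Int) := by
          show ((pvClosB (pvOnesB grid) (grid.length * (grid.headD []).length + 1)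
              (PySem.Set.ofList [c]) : List (Int × Int)).length : Int) = _
          rw [← hctf, List.toFinset_card_of_nodup hcnd]
        rw [hstepB, hstepA, havoid]
        refine ih _ _ ?_ ?_ ?_ ?_ ?_ ?_ ?_
        · show max stA.1 (((pvReach (pvOnesF grid) c).card : Nat) : Int)
            = max stB.1 (PySem.Set.len (pvClosB (pvOnesB grid)
                (grid.length * (grid.headD []).length + 1) (PySem.Set.ofList [c])))
          rw [hv, hlen]
        · exact le_trans h0 (le_max_left _ _)
        · exact hnd'
        · exact PySem.Set.nodup_union _ _ hndB
        · intro q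
          show q ∈ pvKeys (pvDfsA grid (grid.length : Int) ((grid.headD []).length : Int)
             (grid.length * (grid.headD []).length + 1) c stA.2).2
            ↔ q ∈ PySem.Set.union stB.2 (pvClosB (pvOnesB grid)
                (grid.length * (grid.headD []).length + 1) (PySem.Set.ofList [c]))
          rw [hk', havoid, Finset.mem_union]
          constructor
          · rintro (h | h)
            · exact (PySem.Set.mem_union _ _ q).2 (Or.inl ((hmem q).1 h))
            · exact (PySem.Set.mem_union _ _ q).2 (Or.inr ((hcm q).2 h))
          · intro h
            rcases (PySem.Set.mem_union _ _ q).1 h with h | h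
            · exact Or.inl ((hmem q).2 h)
            · exact Or.inr ((hcm q).1 h)
        · intro q hq
          rw [show pvKeys (pvDfsA grid (grid.length : Int) ((grid.headD []).length : Int)
             (grid.length * (grid.headD []).length + 1) c stA.2).2
             = pvKeys stA.2 ∪ pvReach (pvOnesF grid) c from by rw [hk', havoid]] at hq
          rcases Finset.mem_union.1 hq with hq | hq
          · exact hsub q hq
          · exact pv_satN_subset (pvOnesF grid) c hcone _ hq
        · intro q r hq hr
          rw [show pvKeys (pvDfsA grid (grid.length : Int) ((grid.headD []).length : Int)
             (grid.length * (grid.headD []).length + 1) c stA.2).2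
             = pvKeys stA.2 ∪ pvReach (pvOnesF grid) c from by rw [hk', havoid]] at hq ⊢
          rcases Finset.mem_union.1 hq with hq | hq
          · exact Finset.mem_union_left _ (hclosed q r hq hr)
          · refine Finset.mem_union_right _ ?_
            have hqA : q ∈ pvOnesF grid := pv_satN_subset (pvOnesF grid) c hcone _ hq
            have hcomp : pvReach (pvOnesF grid) q = pvReach (pvOnesF grid) c :=
              pv_comp_eq (pvOnesF grid) hcone hq
            rw [← hcomp]
            exact (pv_reach_iff (pvOnesF grid) q hqA r).2 hr
    · -- not a one-cell: both sides are inert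
      have hempty : pvNew (pvOnesF grid) (pvKeys stA.2) c = ∅ := by
        rw [pvNew, if_neg]
        intro hx
        exact hcone (Finset.mem_sdiff.1 hx).1
      have hstepB : pvStepB grid stB c = stB := by
        unfold pvStepB
        rw [if_pos (Or.inl (fun hx =>
          hcone ((pv_onesB_mem grid c).1 ((PySem.Set.contains_iff _ _).1 hx))))]
      rw [hstepB, hstepA, hempty]
      refine ih _ _ ?_ ?_ ?_ ?_ ?_ ?_ ?_
      · show max stA.1 ((∅ : Finset (Int × Int)).card : Int) = stB.1
        simp only [Finset.card_empty, Nat.cast_zero]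
        rw [max_eq_left h0, hv]
      · show 0 ≤ max stA.1 ((∅ : Finset (Int × Int)).card : Int)
        exact le_trans h0 (le_max_left _ _)
      · exact hnd'
      · exact hndB
      · intro q
        show q ∈ pvKeys (pvDfsA grid (grid.length : Int) ((grid.headD []).length : Int)
           (grid.length * (grid.headD []).length + 1) c stA.2).2 ↔ q ∈ stB.2
        rw [hk', hempty, Finset.union_empty]; exact hmem q
      · intro q hq
        rw [show pvKeys (pvDfsA grid (grid.length : Int) ((grid.headD []).length : Int)
           (grid.length * (grid.headD []).length + 1) c stA.2).2
           = pvKeys stA.2 from by rw [hk', hempty, Finset.union_empty]] at hq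
        exact hsub q hq
      · intro q r hq hr
        rw [show pvKeys (pvDfsA grid (grid.length : Int) ((grid.headD []).length : Int)
           (grid.length * (grid.headD []).length + 1) c stA.2).2
           = pvKeys stA.2 from by rw [hk', hempty, Finset.union_empty]] at hq ⊢
        exact hclosed q r hq hr

theorem pv_portA_eq (grid : List (List Int)) :
    solution_411_5_1 grid = ((pvCells grid).foldl (pvStepA grid) ((0 : Int), PySem.Dict.empty)).1 :=
  congrArg Prod.fst
    (pv_foldl_nested (pvStepA grid) grid.length (grid.headD []).length
      ((0 : Int), PySem.Dict.empty))

theorem pv_portB_eq (grid : List (List Int)) :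
    solution_411_5_1_alt grid
      = ((pvCells grid).foldl (pvStepB grid) ((0 : Int), PySem.Set.empty)).1 :=
  congrArg Prod.fst
    (pv_foldl_nested (pvStepB grid) grid.length (grid.headD []).length
      ((0 : Int), PySem.Set.empty))

theorem pv_main (grid : List (List Int)) :
    solution_411_5_1 grid = solution_411_5_1_alt grid := by
  rw [pv_portA_eq, pv_portB_eq]
  apply pv_sim grid (pvCells grid)
  · rfl
  · exact le_refl 0
  · simp [PySem.Dict.keys_empty]
  · exact List.nodup_nil
  · intro q; simp [pvKeys, PySem.Dict.keys_empty, PySem.Set.empty]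
  · intro q hq; simp [pvKeys, PySem.Dict.keys_empty] at hq
  · intro q r hq _; simp [pvKeys, PySem.Dict.keys_empty] at hq

-- ===== VERDICT (by name: the statement is the Claim_ definition above) =====
theorem solution_411_5_1_spec : Claim_equal_solution_411_5_1 := by
  intro grid _ _
  exact pv_main grid
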